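-- pv_equiv track=rewrite | github.com/mlefebvre1/projecteuler-python | project_euler/problems/problem93.py | paranthesis_expr
-- ===== SOURCE A (Python) =====
-- def paranthesis_expr(op_expr):
--     """
--     Generating the following expressions : (+ can be any operations of +,-,*,/)
--     a+b+c+d
--     (a+b)+c+d
--     (a+b)+(c+d)
--     (a+b+c)+d
--     a+(b+c+d)
--     a+(b+c)+d
--     a+((b,c)+d)
--     a+(b+(c+d))
--     (a+(b+c))+d
--     ((a+b)+c)+d
--     """
--     for expr in op_expr:
--         a, op1, b, op2, c, op3, d = expr
--         yield a + op1 + b + op2 + c + op3 + d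
--         yield "(" + a + op1 + b + ")" + op2 + c + op3 + d
--         yield "(" + a + op1 + b + ")" + op2 + "(" + c + op3 + d + ")"
--         yield "(" + a + op1 + b + op2 + c + ")" + op3 + d
--         yield a + op1 + "(" + b + op2 + c + op3 + d + ")"
--         yield a + op1 + "(" + b + op2 + c + ")" + op3 + d
--         yield "(" + a + op1 + "(" + b + op2 + c + ")" + ")" + op3 + d
--         yield a + op1 + "(" + "(" + b + op2 + c + ")" + op3 + d + ")"
--         yield "(" + "(" + a + op1 + b + ")" + op2 + c + ")" + op3 + d
--         yield a + op1 + "(" + b + op2 + "(" + c + op3 + d + ")" + ")"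
-- ===== SOURCE B (Python) =====
-- # Each shape is a set of intervals (i, j) over token indices 0..6 meaning
-- # "wrap tokens i..j in parentheses"; the string is rendered in one pass over
-- # the tokens by counting interval endpoints at each position.
-- SHAPES = [
--     [],
--     [(0, 2)],
--     [(0, 2), (4, 6)],
--     [(0, 4)],
--     [(2, 6)],
--     [(2, 4)],
--     [(0, 4), (2, 4)],
--     [(2, 6), (2, 4)],
--     [(0, 2), (0, 4)],
--     [(2, 6), (4, 6)],
-- ]
--
-- def paranthesis_expr(op_expr):
--     for expr in op_expr:
--         a, op1, b, op2, c, op3, d = expr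
--         tokens = (a, op1, b, op2, c, op3, d)
--         for shape in SHAPES:
--             parts = []
--             for k, tok in enumerate(tokens):
--                 parts.append("(" * sum(1 for i, _ in shape if i == k))
--                 parts.append(tok)
--                 parts.append(")" * sum(1 for _, j in shape if j == k))
--             yield "".join(parts)
-- ===== Notes on version B (the rewrite author's own statement) =====
-- stated objective: alternative
-- what changed: Instead of ten hardcoded parenthesized concatenations, B encodes each shape as a set of token-index intervals and renders every string in one pass over the seven tokens by counting open/close interval endpoints at each position.
import Mathlib
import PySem

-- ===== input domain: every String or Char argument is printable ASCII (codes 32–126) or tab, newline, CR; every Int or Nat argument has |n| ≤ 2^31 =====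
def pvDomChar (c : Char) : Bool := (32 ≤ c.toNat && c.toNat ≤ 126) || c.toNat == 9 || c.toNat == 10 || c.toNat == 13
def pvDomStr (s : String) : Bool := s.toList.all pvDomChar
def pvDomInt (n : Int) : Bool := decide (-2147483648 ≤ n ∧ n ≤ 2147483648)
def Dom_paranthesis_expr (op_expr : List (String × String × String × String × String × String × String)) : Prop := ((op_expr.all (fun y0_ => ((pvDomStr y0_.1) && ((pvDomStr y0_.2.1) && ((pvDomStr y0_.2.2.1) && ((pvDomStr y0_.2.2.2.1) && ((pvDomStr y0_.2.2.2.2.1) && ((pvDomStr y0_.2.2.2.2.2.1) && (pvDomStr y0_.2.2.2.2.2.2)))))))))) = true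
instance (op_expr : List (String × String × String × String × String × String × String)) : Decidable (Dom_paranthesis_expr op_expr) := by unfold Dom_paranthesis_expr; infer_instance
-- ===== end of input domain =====

-- B encodes each shape as a set of token-index intervals and renders each string in one
-- pass over the seven tokens, counting open/close endpoints at each position (alternative).

-- ===== PORT A =====
-- literal transliteration: the generator yields ten concatenations per 7-tuple, in order
def paranthesis_expr : List (String × String × String × String × String × String × String) → List String
  | [] => []
  | (a, op1, b, op2, c, op3, d) :: rest =>
      (a ++ op1 ++ b ++ op2 ++ c ++ op3 ++ d) ::
      ("(" ++ a ++ op1 ++ b ++ ")" ++ op2 ++ c ++ op3 ++ d) ::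
      ("(" ++ a ++ op1 ++ b ++ ")" ++ op2 ++ "(" ++ c ++ op3 ++ d ++ ")") ::
      ("(" ++ a ++ op1 ++ b ++ op2 ++ c ++ ")" ++ op3 ++ d) ::
      (a ++ op1 ++ "(" ++ b ++ op2 ++ c ++ op3 ++ d ++ ")") ::
      (a ++ op1 ++ "(" ++ b ++ op2 ++ c ++ ")" ++ op3 ++ d) ::
      ("(" ++ a ++ op1 ++ "(" ++ b ++ op2 ++ c ++ ")" ++ ")" ++ op3 ++ d) ::
      (a ++ op1 ++ "(" ++ "(" ++ b ++ op2 ++ c ++ ")" ++ op3 ++ d ++ ")") ::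
      ("(" ++ "(" ++ a ++ op1 ++ b ++ ")" ++ op2 ++ c ++ ")" ++ op3 ++ d) ::
      (a ++ op1 ++ "(" ++ b ++ op2 ++ "(" ++ c ++ op3 ++ d ++ ")" ++ ")") ::
      paranthesis_expr rest

-- ===== PORT B =====
-- Source B's module-level SHAPES table: each shape is a list of (open, close) token-index pairs
def pvShapes : List (List (Int × Int)) :=
  [ [], [(0, 2)], [(0, 2), (4, 6)], [(0, 4)], [(2, 6)], [(2, 4)],
    [(0, 4), (2, 4)], [(2, 6), (2, 4)], [(0, 2), (0, 4)], [(2, 6), (4, 6)] ]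

-- the inner `for k, tok in enumerate(tokens)` loop building `parts`, then "".join(parts)
def pvRender (tokens : List String) (shape : List (Int × Int)) : String :=
  PySem.Str.join "" ((PySem.List.enumerate tokens).flatMap (fun kt =>
    [ String.ofList (List.replicate ((shape.filter (fun p => p.1 == kt.1)).length) '('),
      kt.2,
      String.ofList (List.replicate ((shape.filter (fun p => p.2 == kt.1)).length) ')') ]))

def paranthesis_expr_alt (op_expr : List (String × String × String × String × String × String × String)) : List String :=
  op_expr.flatMap (fun e =>
    match e with
    | (a, op1, b, op2, c, op3, d) =>
      pvShapes.map (fun shape => pvRender [a, op1, b, op2, c, op3, d] shape))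

-- ===== PRECONDITION & SPEC =====
def Spec_paranthesis_expr (op_expr : List (String × String × String × String × String × String × String)) (out : List String) : Prop := out = paranthesis_expr_alt op_expr
instance (op_expr : List (String × String × String × String × String × String × String)) (out : List String) : Decidable (Spec_paranthesis_expr op_expr out) := by unfold Spec_paranthesis_expr; infer_instance

-- ===== CLAIM (what is proved, stated in full; the proofs are below) =====
def Claim_equal_paranthesis_expr : Prop := ∀ (op_expr : List (String × String × String × String × String × String × String)), Dom_paranthesis_expr op_expr → Spec_paranthesis_expr op_expr (paranthesis_expr op_expr)

-- ===== LEMMAS AND PROOFS =====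
theorem intercalate_nil_flatten (xss : List (List Char)) : List.intercalate [] xss = xss.flatten := by
  induction xss with
  | nil => rfl
  | cons x xs ih =>
    cases xs with
    | nil => simp [List.intercalate]
    | cons y ys =>
      simp [List.intercalate, List.intersperse] at ih ⊢
      exact ih

theorem join_empty_eq_concat (l : List String) : PySem.Str.join "" l = String.ofList ((l.map String.toList).flatten) := by
  simp [PySem.Str.join, PySem.Chars.join, intercalate_nil_flatten]

theorem ports_agree (op_expr : List (String × String × String × String × String × String × String)) :
    paranthesis_expr op_expr = paranthesis_expr_alt op_expr := by
  induction op_expr with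
  | nil => rfl
  | cons e rest ih =>
    obtain ⟨a, op1, b, op2, c, op3, d⟩ := e
    simp only [paranthesis_expr, paranthesis_expr_alt, pvShapes, pvRender,
      PySem.List.enumerate, List.flatMap_cons, List.map, List.filter,
      join_empty_eq_concat] at *
    simp [ih, ← String.toList_inj]

-- ===== VERDICT (by name: the statement is the Claim_ definition above) =====
theorem paranthesis_expr_spec : Claim_equal_paranthesis_expr :=
  fun op_expr _ => ports_agree op_expr
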